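-- pv_equiv track=rewrite | github.com/JDawg747/Oot | oot.py | ootifier
-- ===== SOURCE A (Python) =====
-- def ootifier(ootinput, oot):
-- 	vowels_list = ['A', 'E', 'I', 'O', 'U', 'a', 'e', 'i', 'o', 'u']
-- 	new_string = []
-- 	string_list = list(ootinput)
--
-- 	for char in string_list:
-- 		for char2 in vowels_list:
-- 			if char == char2:
-- 				new_string.append(oot)
-- 				break
-- 		else:
-- 			new_string.append(char)
--
-- 	return(''.join(new_string))
-- ===== SOURCE B (Python) =====
-- def ootifier(ootinput, oot):
--     # Split the input into the (possibly empty) vowel-free segments between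
--     # vowels, then join those segments with oot as the separator.
--     vowels = set('AEIOUaeiou')
--     parts = []
--     cur = []
--     for ch in ootinput:
--         if ch in vowels:
--             parts.append(''.join(cur))
--             cur = []
--         else:
--             cur.append(ch)
--     parts.append(''.join(cur))
--     return oot.join(parts)
-- ===== Notes on version B (the rewrite author's own statement) =====
-- stated objective: alternative
-- what changed: Instead of A's per-character replacement (nested vowel scan appending oot or the char), B splits the input into the vowel-free segments between vowels and joins those segments with oot as the separator (split-then-join).
import Mathlib
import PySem

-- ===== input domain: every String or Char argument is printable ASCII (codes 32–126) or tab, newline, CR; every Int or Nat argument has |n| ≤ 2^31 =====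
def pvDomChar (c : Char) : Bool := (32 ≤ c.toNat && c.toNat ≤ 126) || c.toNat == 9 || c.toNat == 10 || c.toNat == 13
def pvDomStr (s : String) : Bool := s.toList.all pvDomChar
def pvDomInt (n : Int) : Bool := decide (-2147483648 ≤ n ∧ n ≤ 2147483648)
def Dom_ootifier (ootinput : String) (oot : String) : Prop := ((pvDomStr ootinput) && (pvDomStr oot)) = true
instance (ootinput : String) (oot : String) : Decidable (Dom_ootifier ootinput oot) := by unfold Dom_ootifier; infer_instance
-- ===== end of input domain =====

-- B replaces A's per-character vowel replacement (nested scan over a vowel list) by a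
-- split-then-join algorithm: split the input into vowel-free segments, join them with oot.


-- ===== PORT A =====
-- inner 'for char2 in vowels_list: if char == char2: append oot; break / else: append char'
-- (the value appended for this char: oot on the first vowel match, else the char itself)
def ootInner (c : Char) (oot : String) : List Char → String
  | [] => String.ofList [c]
  | v :: vs => if c = v then oot else ootInner c oot vs

def ootifier (ootinput : String) (oot : String) : String :=
  let vowels_list : List Char := ['A', 'E', 'I', 'O', 'U', 'a', 'e', 'i', 'o', 'u']
  let string_list := ootinput.toList
  let new_string : List String :=
    string_list.foldl (fun acc char => acc ++ [ootInner char oot vowels_list]) []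
  PySem.Str.join "" new_string

-- ===== PORT B =====
-- vowels = set('AEIOUaeiou')
def ootVowels : PySem.Set Char := PySem.Set.ofList "AEIOUaeiou".toList

-- loop body: on a vowel flush the current segment into parts, else extend the segment
def ootStep (st : List String × List Char) (ch : Char) : List String × List Char :=
  if ch ∈ ootVowels then (st.1 ++ [String.ofList st.2], []) else (st.1, st.2 ++ [ch])

def ootifier_alt (ootinput : String) (oot : String) : String :=
  let st := ootinput.toList.foldl ootStep ([], [])
  PySem.Str.join oot (st.1 ++ [String.ofList st.2])

-- ===== PRECONDITION & SPEC =====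
def Spec_ootifier (ootinput : String) (oot : String) (out : String) : Prop := out = ootifier_alt ootinput oot
instance (ootinput : String) (oot : String) (out : String) : Decidable (Spec_ootifier ootinput oot out) := by unfold Spec_ootifier; infer_instance

-- ===== CLAIM =====
def Claim_equal_ootifier : Prop := ∀ (ootinput : String) (oot : String), Dom_ootifier ootinput oot → Spec_ootifier ootinput oot (ootifier ootinput oot)

-- ===== LEMMAS AND PROOFS =====
-- A's inner scan over any vowel list is a membership test
theorem ootInner_eq_if (c : Char) (oot : String) (vs : List Char) :
    ootInner c oot vs = if c ∈ vs then oot else String.ofList [c] := by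
  induction vs with
  | nil => simp [ootInner]
  | cons v vs ih => simp only [ootInner, List.mem_cons, ih]; split_ifs <;> simp_all

-- A's foldl builds the map of the per-char function
theorem foldl_append_eq_map (f : Char → String) (l : List Char) (acc : List String) :
    l.foldl (fun a c => a ++ [f c]) acc = acc ++ l.map f := by
  induction l generalizing acc with
  | nil => simp
  | cons x xs ih => simp [List.foldl, ih]

-- joining a nonempty list extended by one more part
theorem join_append_last (sep y : List Char) (xs : List (List Char)) (h : xs ≠ []) :
    PySem.Chars.join sep (xs ++ [y]) = PySem.Chars.join sep xs ++ sep ++ y := by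
  obtain ⟨a, xs, rfl⟩ : ∃ a t, xs = a :: t := by
    cases xs with
    | nil => exact absurd rfl h
    | cons a t => exact ⟨a, t, rfl⟩
  clear h
  induction xs generalizing a with
  | nil => simp [PySem.Chars.join_cons_cons, PySem.Chars.join_singleton]
  | cons b xs ih =>
    rw [List.cons_append, List.cons_append, PySem.Chars.join_cons_cons,
      PySem.Chars.join_cons_cons, ← List.cons_append, ih b]
    simp [List.append_assoc]

-- joining with the empty separator peels the head
theorem join_nil_cons (a : List Char) (rest : List (List Char)) :
    PySem.Chars.join [] (a :: rest) = a ++ PySem.Chars.join [] rest := by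
  cases rest with
  | nil => simp [PySem.Chars.join_singleton, PySem.Chars.join_nil]
  | cons b rest => simp [PySem.Chars.join_cons_cons]

-- extending the LAST segment by one char appends that char to the join
theorem join_grow_last (sep : List Char) (xs : List (List Char)) (C : List Char) (c : Char) :
    PySem.Chars.join sep (xs ++ [C ++ [c]]) = PySem.Chars.join sep (xs ++ [C]) ++ [c] := by
  cases xs with
  | nil => simp [PySem.Chars.join_singleton]
  | cons a xs =>
    rw [join_append_last sep _ _ (by simp), join_append_last sep _ _ (by simp)]
    simp [List.append_assoc]

-- loop invariant for B: the join of the final state equals the join of the starting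
-- state followed by A's per-character output for the remaining characters
theorem oot_key (oot : String) (l : List Char) (P : List String) (C : List Char) :
    (PySem.Str.join oot ((l.foldl ootStep (P, C)).1 ++ [String.ofList (l.foldl ootStep (P, C)).2])).toList
    = (PySem.Str.join oot (P ++ [String.ofList C])).toList
      ++ PySem.Chars.join [] (l.map (fun c => (if c ∈ ootVowels then oot else String.ofList [c]).toList)) := by
  induction l generalizing P C with
  | nil => simp [PySem.Chars.join_nil]
  | cons c l ih =>
    by_cases hv : c ∈ ootVowels
    · rw [List.foldl_cons, show ootStep (P, C) c = (P ++ [String.ofList C], []) by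
        simp [ootStep, hv], ih, List.map_cons, if_pos hv, join_nil_cons]
      simp only [PySem.Str.toList_join, List.map_append, List.map_cons, List.map_nil]
      rw [String.ofList_nil] at *
      rw [join_append_last _ _ _ (by simp)]
      simp [List.append_assoc]
    · rw [List.foldl_cons, show ootStep (P, C) c = (P, C ++ [c]) by
        simp [ootStep, hv], ih, List.map_cons, if_neg hv, join_nil_cons]
      simp only [PySem.Str.toList_join, List.map_append, List.map_cons, List.map_nil,
        String.toList_ofList]
      rw [join_grow_last]
      simp [List.append_assoc]

-- ===== VERDICT =====
theorem ootifier_spec : Claim_equal_ootifier := by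
  intro ootinput oot _
  unfold Spec_ootifier ootifier ootifier_alt
  dsimp only
  rw [foldl_append_eq_map, ← String.toList_inj, oot_key]
  simp only [PySem.Str.toList_join, List.nil_append, List.map_cons, List.map_nil,
    PySem.Chars.join_singleton, List.map_map, String.ofList_nil]
  congr 1
  apply List.map_congr_left
  intro c _
  simp [Function.comp, ootInner_eq_if, ootVowels, PySem.Set.mem_ofList]
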